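-- pv_equiv track=rewrite | github.com/thomskaf/CompressCSS | ccss/ccss.py | css_line_breaker
-- ===== SOURCE A (Python) =====
-- def css_line_breaker(css, new_length=700):
--     """Breaks up long lines of CSS code into shorter ones.
--        Messy code that needs a better docstring!
--
--        :param css: CSS code to break
--     """
--     new_string = ''
--     char_counter = 0
--
--     for char in css:
--         if char_counter > new_length and char == '}':
--             new_string = new_string + "}\n"
--             char_counter = 0
--         else:
--             new_string = new_string + char
--         char_counter = char_counter + 1
--
--     return new_string
-- ===== SOURCE B (Python) =====
-- def css_line_breaker(css, new_length=700):
--     """Breaks up long lines of CSS code into shorter ones.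
--
--        Jumps with str.find instead of scanning each character: collect the
--        indices of the braces after which a newline goes, then join slices.
--     """
--     breaks = []
--     start = max(new_length + 1, 0)
--     while True:
--         idx = css.find('}', start)
--         if idx == -1:
--             break
--         breaks.append(idx)
--         start = idx + max(new_length + 1, 1)
--     parts = []
--     prev = 0
--     for idx in breaks:
--         parts.append(css[prev:idx + 1])
--         parts.append('\n')
--         prev = idx + 1
--     parts.append(css[prev:])
--     return ''.join(parts)
-- ===== Notes on version B (the rewrite author's own statement) =====
-- stated objective: faster
-- what changed: Replaces the per-character Python loop with a running counter by repeated str.find jumps to the next qualifying closing brace (the counter becomes index arithmetic), then assembles the result from slices with a newline after each recorded brace.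
import Mathlib
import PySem

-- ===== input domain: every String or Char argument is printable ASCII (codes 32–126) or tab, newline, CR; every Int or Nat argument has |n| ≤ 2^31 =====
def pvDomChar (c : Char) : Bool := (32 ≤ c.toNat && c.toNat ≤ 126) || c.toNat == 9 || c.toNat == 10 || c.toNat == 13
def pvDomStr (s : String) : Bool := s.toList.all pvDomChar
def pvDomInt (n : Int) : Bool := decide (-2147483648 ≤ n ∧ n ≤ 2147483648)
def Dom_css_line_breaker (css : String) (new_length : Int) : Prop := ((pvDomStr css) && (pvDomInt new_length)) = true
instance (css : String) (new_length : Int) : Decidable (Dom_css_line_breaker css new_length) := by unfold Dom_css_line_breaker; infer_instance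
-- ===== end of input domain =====

-- B replaces A's per-character scan with str.find jumps to the next break brace plus
-- slice concatenation (measurably faster in a timing run; same result, proved equal).

-- ===== PORT A =====
-- literal port of A: fold over the characters with (new_string, char_counter) state
def css_line_breaker (css : String) (new_length : Int) : String :=
  (css.toList.foldl (fun (st : String × Int) ch =>
      let st' := if st.2 > new_length && ch == '}' then (st.1 ++ "}\n", (0 : Int))
                 else (st.1.push ch, st.2)
      (st'.1, st'.2 + 1)) ("", 0)).1

-- ===== PORT B =====
-- two facts about str.find used only to justify termination of the while-loop below
theorem pvFF_oob (s : String) (k : Nat) (h : s.toList.length ≤ k) :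
    PySem.Str.findFrom s "}" (k : Int) none = -1 := by
  simp only [PySem.Str.findFrom, PySem.Chars.findFrom, String.length_toList]
  have hfind : PySem.Chars.find (List.drop ((k : Int)).toNat (List.take ((s.length : Int)).toNat s.toList)) "}".toList = -1 := by
    rw [List.drop_eq_nil_of_le (by have hls := String.length_toList (s := s); simp [List.length_take]; omega)]
    rw [PySem.Chars.find_eq_neg_one_iff]
    simp [List.infix_nil]
  split_ifs with h1 h2 h3 <;> first | rfl | (exfalso; omega) | (exfalso; exact h3 hfind)

theorem pvFF_bounds (s : String) (k : Nat) (hk : k ≤ s.toList.length)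
    (h : PySem.Str.findFrom s "}" (k : Int) none ≠ -1) :
    (k : Int) ≤ PySem.Str.findFrom s "}" (k : Int) none ∧
    (PySem.Str.findFrom s "}" (k : Int) none).toNat < s.toList.length := by
  rw [PySem.Str.findFrom_eq] at *
  obtain ⟨h1, h2, h3⟩ := PySem.Chars.findFrom_natCast_spec s.toList "}".toList k
    (by rwa [String.length_toList] at hk) h
  refine ⟨h1, ?_⟩
  have hl := h2.length_le
  rw [List.length_drop] at hl
  have : ("}".toList).length = 1 := rfl
  omega

-- Source B's while loop: collect the break indices by repeated css.find('}', start)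
-- (start and the indices are nonnegative in Source B, so they are carried as Nat)
def pvCollect (css : String) (new_length : Int) (start : Nat) : List Nat :=
  let idx := PySem.Str.findFrom css "}" (start : Int) none
  if h : idx = -1 then []
  else idx.toNat :: pvCollect css new_length (idx.toNat + (max (new_length + 1) 1).toNat)
termination_by css.toList.length + 1 - start
decreasing_by
  by_cases hk : start ≤ css.toList.length
  · have hb := pvFF_bounds css start hk h
    have hM : (1 : Int) ≤ max (new_length + 1) 1 := le_max_right _ _
    omega
  · exact absurd (pvFF_oob css start (by omega)) h

-- the body of Source B's rendering for-loop
def pvStep (css : String) (st : List String × Nat) (idx : Nat) : List String × Nat :=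
  (st.1 ++ [PySem.Str.slice css (some ((st.2 : Nat) : Int)) (some ((idx : Int) + 1)), "\n"], idx + 1)

def css_line_breaker_alt (css : String) (new_length : Int) : String :=
  let breaks := pvCollect css new_length ((max (new_length + 1) 0).toNat)
  let fin := breaks.foldl (pvStep css) ([], 0)
  PySem.Str.join "" (fin.1 ++ [PySem.Str.slice css (some ((fin.2 : Nat) : Int)) none])

-- ===== PRECONDITION & SPEC =====
def Spec_css_line_breaker (css : String) (new_length : Int) (out : String) : Prop := out = css_line_breaker_alt css new_length
instance (css : String) (new_length : Int) (out : String) : Decidable (Spec_css_line_breaker css new_length out) := by unfold Spec_css_line_breaker; infer_instance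

-- ===== CLAIM (what is proved, stated in full; the proofs are below) =====
def Claim_equal_css_line_breaker : Prop := ∀ (css : String) (new_length : Int), Dom_css_line_breaker css new_length → Spec_css_line_breaker css new_length (css_line_breaker css new_length)

-- ===== LEMMAS AND PROOFS =====

-- the character-level recursion both ports are reduced to
def pvF (n : Int) : List Char → Int → List Char
  | [], _ => []
  | ch :: t, c => if c > n ∧ ch = '}' then '}' :: '\n' :: pvF n t 1 else ch :: pvF n t (c + 1)

theorem pvA_go (n : Int) (cs : List Char) : ∀ (s : String) (c : Int),
    ((cs.foldl (fun (st : String × Int) ch =>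
      let st' := if st.2 > n && ch == '}' then (st.1 ++ "}\n", (0 : Int))
                 else (st.1.push ch, st.2)
      (st'.1, st'.2 + 1)) (s, c)).1).toList = s.toList ++ pvF n cs c := by
  induction cs with
  | nil => intro s c; simp [pvF]
  | cons ch t ih =>
    intro s c
    by_cases hb : c > n ∧ ch = '}'
    · have : (decide (c > n) && (ch == '}')) = true := by
        simp [hb.1, hb.2]
      simp only [List.foldl_cons, this, if_true, pvF, if_pos hb]
      rw [ih]
      simp
    · have : (decide (c > n) && (ch == '}')) = false := by
        rcases not_and_or.mp hb with h | h <;> simp [h]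
      simp only [List.foldl_cons, this, pvF, if_neg hb]
      rw [ih]
      simp

theorem pvA_eq (css : String) (n : Int) :
    (css_line_breaker css n).toList = pvF n css.toList 0 := by
  unfold css_line_breaker
  rw [pvA_go]
  simp

-- pvF when no brace qualifies
theorem pvF_no_break (n : Int) (t : List Char) : ∀ (c : Int),
    (∀ p : Nat, t[p]? = some '}' → ¬ (c + p > n)) → pvF n t c = t := by
  induction t with
  | nil => intro c _; rfl
  | cons ch t' ih =>
    intro c h
    have h0 : ¬ (c > n ∧ ch = '}') := by
      rintro ⟨h1, h2⟩
      exact h 0 (by simp [h2]) (by simpa using h1)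
    rw [pvF, if_neg h0, ih (c + 1) (fun p hp => ?_)]
    intro hgt
    exact h (p + 1) (by simpa using hp) (by push_cast at *; omega)

-- pvF at the first qualifying brace
theorem pvF_break (n : Int) (t : List Char) : ∀ (p : Nat) (c : Int),
    t[p]? = some '}' → c + p > n →
    (∀ q : Nat, q < p → t[q]? = some '}' → ¬ (c + q > n)) →
    pvF n t c = t.take (p + 1) ++ '\n' :: pvF n (t.drop (p + 1)) 1 := by
  induction t with
  | nil => intro p c hp _ _; simp at hp
  | cons ch t' ih =>
    intro p c hp hgt hmin
    cases p with
    | zero =>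
      have hch : ch = '}' := by simpa using hp
      have hc : c > n := by simpa using hgt
      rw [pvF, if_pos ⟨hc, hch⟩]
      simp [hch]
    | succ p' =>
      have h0 : ¬ (c > n ∧ ch = '}') := by
        rintro ⟨h1, h2⟩
        exact hmin 0 (by omega) (by simp [h2]) (by simpa using h1)
      rw [pvF, if_neg h0]
      rw [ih p' (c + 1) (by simpa using hp) (by push_cast at *; omega)
        (fun q hq hq' => by
          have := hmin (q + 1) (by omega) (by simpa using hq')
          intro hgt'; exact this (by push_cast at *; omega))]
      simp

-- join with empty separator is flatten
theorem pvJoin_nil (parts : List (List Char)) : PySem.Chars.join [] parts = parts.flatten := by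
  induction parts with
  | nil => rfl
  | cons h t ih =>
    cases t with
    | nil => simp [PySem.Chars.join, List.intercalate]
    | cons h2 t2 =>
      simp only [PySem.Chars.join, List.intercalate] at *
      simp [List.intersperse] at *
      simpa using ih

-- singleton prefix of a drop = getElem?
theorem pvPrefix_iff (l : List Char) (i : Nat) (a : Char) :
    [a] <+: l.drop i ↔ l[i]? = some a := by
  by_cases h : i < l.length
  · rw [List.drop_eq_getElem_cons h]
    constructor
    · rintro ⟨t, ht⟩
      simp only [List.cons_append, List.nil_append, List.cons.injEq] at ht
      simp [List.getElem?_eq_getElem h, ht.1]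
    · intro hv
      have hla : l[i] = a := by
        rw [List.getElem?_eq_getElem h] at hv; exact Option.some.inj hv
      exact ⟨l.drop (i + 1), by rw [hla]; rfl⟩
  · rw [List.drop_eq_nil_of_le (by omega)]
    have hnone : l[i]? = none := List.getElem?_eq_none_iff.mpr (by omega)
    simp [hnone]

-- full first-occurrence characterisation of css.find('}', start)
theorem pvFF_spec (s : String) (k : Nat) (hk : k ≤ s.toList.length)
    (h : PySem.Str.findFrom s "}" (k : Int) none ≠ -1) :
    k ≤ (PySem.Str.findFrom s "}" (k : Int) none).toNat ∧
    (PySem.Str.findFrom s "}" (k : Int) none).toNat < s.toList.length ∧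
    s.toList[(PySem.Str.findFrom s "}" (k : Int) none).toNat]? = some '}' ∧
    ∀ i : Nat, k ≤ i → i < (PySem.Str.findFrom s "}" (k : Int) none).toNat →
      s.toList[i]? ≠ some '}' := by
  have hb := pvFF_bounds s k hk h
  rw [PySem.Str.findFrom_eq] at *
  obtain ⟨h1, h2, h3⟩ := PySem.Chars.findFrom_natCast_spec s.toList "}".toList k
    (by rwa [String.length_toList] at hk) h
  refine ⟨by omega, hb.2, ?_, ?_⟩
  · exact (pvPrefix_iff _ _ _).mp h2
  · intro i hik hi hv
    exact h3 i hik hi ((pvPrefix_iff _ _ _).mpr hv)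

theorem pvFF_none (s : String) (k : Nat)
    (h : PySem.Str.findFrom s "}" (k : Int) none = -1) :
    ∀ i : Nat, k ≤ i → s.toList[i]? ≠ some '}' := by
  intro i hik hv
  have hilen : i < s.toList.length := by
    by_contra hc
    rw [List.getElem?_eq_none_iff.mpr (by omega)] at hv; simp at hv
  have hk : k ≤ s.toList.length := by omega
  rw [PySem.Str.findFrom_eq] at h
  rw [PySem.Chars.findFrom_natCast_eq_neg_one_iff s.toList "}".toList k
    (by rwa [String.length_toList] at hk)] at h
  have hpre : ("}".toList) <+: (s.toList.drop k).drop (i - k) := by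
    rw [List.drop_drop]
    have hkik : k + (i - k) = i := by omega
    rw [hkik]
    exact (pvPrefix_iff _ _ _).mpr hv
  exact h (hpre.isInfix.trans (List.drop_suffix _ _).isInfix)

-- Source B's rendering loop, written as structural recursion on the break list
def pvRender (css : String) (prev : Nat) : List Nat → List String
  | [] => [PySem.Str.slice css (some ((prev : Nat) : Int)) none]
  | i :: bs => PySem.Str.slice css (some ((prev : Nat) : Int)) (some ((i : Int) + 1)) ::
      "\n" :: pvRender css (i + 1) bs

theorem pvFold_render (css : String) : ∀ (bs : List Nat) (acc : List String) (prev : Nat),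
    (bs.foldl (pvStep css) (acc, prev)).1 ++
    [PySem.Str.slice css (some (((bs.foldl (pvStep css) (acc, prev)).2 : Nat) : Int)) none]
    = acc ++ pvRender css prev bs := by
  intro bs
  induction bs with
  | nil => intro acc prev; simp [pvRender]
  | cons i bs ih =>
    intro acc prev
    simp only [List.foldl_cons, pvStep, pvRender]
    rw [ih]
    simp

-- cast of the clamped offset
theorem pvMaxCast (a : Int) : (((max a 0).toNat : Nat) : Int) = max a 0 :=
  Int.toNat_of_nonneg (le_max_right _ _)

-- the no-more-braces case, shared by the base and the -1 branches of pvKey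
theorem pvKey_none (css : String) (n : Int) (prev : Nat) (δ : Int)
    (hidx : PySem.Str.findFrom css "}" ((prev + (max (n + 1 - δ) 0).toNat : Nat) : Int) none = -1) :
    PySem.Chars.join []
      ((pvRender css prev (pvCollect css n (prev + (max (n + 1 - δ) 0).toNat))).map String.toList)
    = pvF n (css.toList.drop prev) δ := by
  have hcol : pvCollect css n (prev + (max (n + 1 - δ) 0).toNat) = [] := by
    rw [pvCollect]
    simp only [hidx]
    simp
  rw [hcol]
  have hnone := pvFF_none css (prev + (max (n + 1 - δ) 0).toNat) hidx
  rw [pvF_no_break n _ δ ?_]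
  · simp [pvRender, pvJoin_nil, PySem.List.slice_from_natCast]
  · intro p hp hgt
    rw [List.getElem?_drop] at hp
    have hcast := pvMaxCast (n + 1 - δ)
    have hle : max (n + 1 - δ) 0 ≤ (p : Int) := max_le (by omega) (by positivity)
    exact hnone (prev + p) (by omega) hp

-- the key invariant: rendering the collected breaks from prev equals pvF on the suffix
theorem pvKey (css : String) (n : Int) : ∀ (m prev : Nat) (δ : Int),
    css.toList.length - prev ≤ m → prev ≤ css.toList.length →
    PySem.Chars.join []
      ((pvRender css prev (pvCollect css n (prev + (max (n + 1 - δ) 0).toNat))).map String.toList)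
    = pvF n (css.toList.drop prev) δ := by
  intro m
  induction m with
  | zero =>
    intro prev δ hm hp
    exact pvKey_none css n prev δ (pvFF_oob css _ (by omega))
  | succ m ih =>
    intro prev δ hm hp
    by_cases hidx : PySem.Str.findFrom css "}" ((prev + (max (n + 1 - δ) 0).toNat : Nat) : Int) none = -1
    · exact pvKey_none css n prev δ hidx
    · have hstartlen : prev + (max (n + 1 - δ) 0).toNat ≤ css.toList.length := by
        by_contra hc
        exact hidx (pvFF_oob css _ (by omega))
      obtain ⟨hs1, hs2, hs3, hs4⟩ := pvFF_spec css _ hstartlen hidx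
      set I := (PySem.Str.findFrom css "}" ((prev + (max (n + 1 - δ) 0).toNat : Nat) : Int) none).toNat with hI
      have hcol : pvCollect css n (prev + (max (n + 1 - δ) 0).toNat)
          = I :: pvCollect css n (I + (max (n + 1) 1).toNat) := by
        rw [pvCollect]
        simp only [← hI]
        rw [dif_neg hidx]
      have hM1 : I + (max (n + 1) 1).toNat = (I + 1) + (max (n + 1 - 1) 0).toNat := by
        omega
      have hcast := pvMaxCast (n + 1 - δ)
      have hprevI : prev ≤ I := by omega
      -- right-hand side via the first-brace characterisation of pvF
      have hrhs := pvF_break n (css.toList.drop prev) (I - prev) δ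
        (by rw [List.getElem?_drop]; rw [Nat.add_sub_cancel' hprevI]; exact hs3)
        (by omega)
        (by
          intro q hq hq' hgt
          rw [List.getElem?_drop] at hq'
          have hle : max (n + 1 - δ) 0 ≤ (q : Int) := max_le (by omega) (by positivity)
          exact hs4 (prev + q) (by omega) (by omega) hq')
      rw [hcol, hrhs]
      -- left-hand side: peel one rendered segment off
      simp only [pvRender, List.map_cons, pvJoin_nil, List.flatten_cons]
      rw [← pvJoin_nil]
      rw [hM1]
      rw [ih (I + 1) 1 (by omega) (by omega)]
      have hslice : (PySem.Str.slice css (some ((prev : Nat) : Int)) (some ((I : Int) + 1))).toList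
          = (css.toList.drop prev).take (I - prev + 1) := by
        have : ((I : Int) + 1) = (((I + 1 : Nat) : Nat) : Int) := by push_cast; ring
        rw [this]
        simp only [PySem.Str.toList_slice, PySem.Chars.slice_eq_listSlice,
          PySem.List.slice_natCast]
        congr 1
        omega
      rw [hslice]
      have hdrop : (css.toList.drop prev).drop (I - prev + 1) = css.toList.drop (I + 1) := by
        rw [List.drop_drop]
        congr 1
        omega
      rw [hdrop]
      rfl

-- ===== VERDICT (by name: the statement is the Claim_ definition above) =====
theorem css_line_breaker_spec : Claim_equal_css_line_breaker := by
  intro css n _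
  unfold Spec_css_line_breaker
  apply String.toList_inj.mp
  rw [pvA_eq]
  show pvF n css.toList 0 = (PySem.Str.join ""
    ((List.foldl (pvStep css) ([], 0) (pvCollect css n ((max (n + 1) 0).toNat))).1 ++
     [PySem.Str.slice css (some ((((List.foldl (pvStep css) ([], 0)
        (pvCollect css n ((max (n + 1) 0).toNat))).2 : Nat) : Int))) none])).toList
  have hfold := pvFold_render css (pvCollect css n ((max (n + 1) 0).toNat)) [] 0
  simp only [List.nil_append] at hfold
  rw [hfold]
  have hkey := pvKey css n css.toList.length 0 0 (by omega) (by omega)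
  simp only [Nat.zero_add, List.drop_zero] at hkey
  rw [PySem.Str.toList_join]
  have hstart : (max (n + 1 - 0) 0).toNat = (max (n + 1) 0).toNat := by norm_num
  rw [← hstart]
  simpa using hkey.symm
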